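-- pv_equiv track=rewrite | github.com/dinacmistry/advent-of-code-2025 | day-2-invalid-ids-part-1.py | get_invalid_ids
-- ===== SOURCE A (Python) =====
-- def get_invalid_ids(start, stop):
--     invalid_ids = []
--     x = range(start, stop + 1)
--     for i in x:
--         text = str(i)
--         size = len(text)
--
--         if size % 2 == 0:
--             halfsize = int(size/2)
--
--         else:
--             continue
--
--         half = text[0:halfsize]
--         if text[0:halfsize] == text[halfsize:]:
--             invalid_ids.append(i)
--
--     return invalid_ids
-- ===== SOURCE B (Python) =====
-- def get_invalid_ids(start, stop):
--     # Generate the "repeated half" numbers h*(10**k + 1) for k-digit h, ascending,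
--     # clipped to [start, stop], instead of testing every integer in the range.
--     res = []
--     if stop >= 11:
--         max_k = (len(str(stop)) + 1) // 2
--         for k in range(1, max_k + 1):
--             m = 10 ** k + 1
--             lo = max(10 ** (k - 1), -(-start // m))   # ceil(start / m)
--             hi = min(10 ** k - 1, stop // m)
--             res.extend(h * m for h in range(lo, hi + 1))
--     return res
-- ===== Notes on version B (the rewrite author's own statement) =====
-- stated objective: faster
-- what changed: Instead of scanning every integer in [start, stop] and comparing string halves, B directly generates the valid ids h*(10^k+1) for each k-digit h clipped to the range, so the cost depends only on the number of ids produced.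
import Mathlib
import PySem

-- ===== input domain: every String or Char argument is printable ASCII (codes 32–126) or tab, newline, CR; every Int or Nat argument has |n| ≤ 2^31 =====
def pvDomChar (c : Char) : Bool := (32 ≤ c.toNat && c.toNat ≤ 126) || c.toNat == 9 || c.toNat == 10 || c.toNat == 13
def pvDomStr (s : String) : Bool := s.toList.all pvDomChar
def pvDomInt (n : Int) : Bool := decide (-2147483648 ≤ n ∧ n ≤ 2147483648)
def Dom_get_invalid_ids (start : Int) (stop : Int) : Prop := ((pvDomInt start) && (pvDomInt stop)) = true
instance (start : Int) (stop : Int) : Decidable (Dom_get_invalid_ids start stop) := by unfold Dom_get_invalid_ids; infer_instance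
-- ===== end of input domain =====

-- B replaces A's per-integer scan with direct generation of the ids h*(10^k+1); objective: faster.

-- ===== PORT A =====
-- Literal port of A: for each i in range(start, stop+1), compare the two halves of str(i).
-- `int(size/2)` is exact float halving of an even nonnegative size, ported as floor division.
def get_invalid_ids (start : Int) (stop : Int) : List Int :=
  (PySem.List.pyRange start (stop + 1) 1).foldl
    (fun invalid_ids i =>
      let text := PySem.Int.toChars i
      let size : Int := PySem.List.len text
      if PySem.Int.mod size 2 = 0 then
        let halfsize := PySem.Int.floordiv size 2
        let half := PySem.List.slice text (some 0) (some halfsize)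
        if half = PySem.List.slice text (some halfsize) none then
          invalid_ids ++ [i]
        else invalid_ids
      else invalid_ids)
    []

-- ===== PORT B =====
-- Literal port of Source B: for each half-width k up to (len(str(stop))+1)//2, emit h*(10^k+1)
-- for the k-digit h lying in the clipped range. (k from range(1, max_k+1) is ≥ 1, so 10**k
-- is ported with the natural-number exponent k.toNat.)
def get_invalid_ids_alt (start : Int) (stop : Int) : List Int :=
  if 11 ≤ stop then
    let max_k := PySem.Int.floordiv (PySem.List.len (PySem.Int.toChars stop) + 1) 2
    (PySem.List.pyRange 1 (max_k + 1) 1).foldl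
      (fun res k =>
        let m : Int := 10 ^ k.toNat + 1
        let lo := max (10 ^ (k.toNat - 1)) (-(PySem.Int.floordiv (-start) m))
        let hi := min (10 ^ k.toNat - 1) (PySem.Int.floordiv stop m)
        res ++ (PySem.List.pyRange lo (hi + 1) 1).map (fun h => h * m))
      []
  else []

-- ===== PRECONDITION & SPEC =====
def Spec_get_invalid_ids (start : Int) (stop : Int) (out : List Int) : Prop := out = get_invalid_ids_alt start stop
instance (start : Int) (stop : Int) (out : List Int) : Decidable (Spec_get_invalid_ids start stop out) := by unfold Spec_get_invalid_ids; infer_instance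

-- ===== CLAIM (what is proved, stated in full; the proofs are below) =====
def Claim_equal_get_invalid_ids : Prop := ∀ (start : Int) (stop : Int), Dom_get_invalid_ids start stop → Spec_get_invalid_ids start stop (get_invalid_ids start stop)

-- ===== LEMMAS AND PROOFS =====

-- The loop predicate of A, as a Boolean function of i alone.
def pvPredB (i : Int) : Bool :=
  let text := PySem.Int.toChars i
  let size : Int := PySem.List.len text
  if PySem.Int.mod size 2 = 0 then
    decide (PySem.List.slice text (some 0) (some (PySem.Int.floordiv size 2)) =
            PySem.List.slice text (some (PySem.Int.floordiv size 2)) none)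
  else false

-- The arithmetic characterisation: i is a "repeated half" number.
def pvRep (x : Int) : Prop := ∃ k h : ℕ, 1 ≤ k ∧ 10 ^ (k - 1) ≤ h ∧ h < 10 ^ k ∧ x = (h : ℤ) * (10 ^ k + 1)

-- One k-block of B's generator.
def pvBlock (start stop k : Int) : List Int :=
  let m : Int := 10 ^ k.toNat + 1
  let lo := max (10 ^ (k.toNat - 1)) (-(PySem.Int.floordiv (-start) m))
  let hi := min (10 ^ k.toNat - 1) (PySem.Int.floordiv stop m)
  (PySem.List.pyRange lo (hi + 1) 1).map (fun h => h * m)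

theorem pvA_eq_filter (start stop : Int) :
    get_invalid_ids start stop = (PySem.List.pyRange start (stop + 1) 1).filter pvPredB := by
  unfold get_invalid_ids
  rw [show (fun (invalid_ids : List Int) i =>
      let text := PySem.Int.toChars i
      let size : Int := PySem.List.len text
      if PySem.Int.mod size 2 = 0 then
        let halfsize := PySem.Int.floordiv size 2
        let half := PySem.List.slice text (some 0) (some halfsize)
        if half = PySem.List.slice text (some halfsize) none then
          invalid_ids ++ [i]
        else invalid_ids
      else invalid_ids) = fun acc i => if pvPredB i = true then acc ++ [(fun j => j) i] else acc
    from by funext acc i; simp only [pvPredB]; split_ifs <;> simp_all]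
  rw [PySem.List.foldl_append_if pvPredB (fun j => j)]
  simp

theorem pvB_eq_flatMap (start stop : Int) (h : 11 ≤ stop) :
    get_invalid_ids_alt start stop =
      (PySem.List.pyRange 1 (PySem.Int.floordiv (PySem.List.len (PySem.Int.toChars stop) + 1) 2 + 1) 1).flatMap
        (pvBlock start stop) := by
  unfold get_invalid_ids_alt
  rw [if_pos h]
  rw [show (fun (res : List Int) k =>
      let m : Int := 10 ^ k.toNat + 1
      let lo := max (10 ^ (k.toNat - 1)) (-(PySem.Int.floordiv (-start) m))
      let hi := min (10 ^ k.toNat - 1) (PySem.Int.floordiv stop m)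
      res ++ (PySem.List.pyRange lo (hi + 1) 1).map (fun h => h * m)) =
      fun res k => res ++ pvBlock start stop k from rfl]
  rw [PySem.List.foldl_append_eq_flatMap]
  simp

theorem pvRep_ge (x : Int) (h : pvRep x) : 11 ≤ x := by
  obtain ⟨k, hh, hk1, hlo, hhi, hx⟩ := h
  have h1 : (1 : ℕ) ≤ 10 ^ (k - 1) := Nat.one_le_pow _ _ (by norm_num)
  have h2 : (1 : ℤ) ≤ (hh : ℤ) := by exact_mod_cast le_trans h1 hlo
  have h3 : (10 : ℤ) ≤ 10 ^ k := by
    calc (10 : ℤ) = 10 ^ 1 := (pow_one _).symm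
    _ ≤ 10 ^ k := pow_le_pow_right₀ (by norm_num) hk1
  nlinarith

theorem pvCore_eq (f : ℕ) : ∀ (n : ℕ) (l : List Char), 0 < n → n < f →
    Nat.toDigitsCore 10 f n l = ((Nat.digits 10 n).map Nat.digitChar).reverse ++ l := by
  induction f with
  | zero => intro n l h1 h2; omega
  | succ f ih =>
    intro n l h1 h2
    simp only [Nat.toDigitsCore]
    by_cases hd : n / 10 = 0
    · have hn : n < 10 := by omega
      rw [if_pos hd, Nat.digits_def' (by norm_num : 1 < 10) h1, hd]
      simp [Nat.mod_eq_of_lt hn]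
    · rw [if_neg hd]
      have hlt : n / 10 < f := by omega
      rw [ih (n / 10) _ (by omega) hlt]
      rw [Nat.digits_def' (by norm_num : 1 < 10) h1]
      simp

theorem pvToChars_pos (n : ℕ) (h : 0 < n) :
    PySem.Int.toChars (n : ℤ) = ((Nat.digits 10 n).map Nat.digitChar).reverse := by
  simp only [PySem.Int.toChars, Nat.toDigits]
  rw [if_neg (by omega)]
  rw [show ((n : ℤ).toNat) = n from rfl]
  rw [pvCore_eq (n + 1) n [] h (by omega)]
  simp

theorem pvToChars_neg (i : ℤ) (h : i < 0) :
    PySem.Int.toChars i = '-' :: ((Nat.digits 10 i.natAbs).map Nat.digitChar).reverse := by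
  simp only [PySem.Int.toChars]
  rw [if_pos h, Nat.toDigits, pvCore_eq _ _ _ (by omega) (by omega)]
  simp

theorem pvPredB_eq (i : Int) :
    pvPredB i = true ↔
      ((PySem.Int.toChars i).length % 2 = 0 ∧
        List.take ((PySem.Int.toChars i).length / 2) (PySem.Int.toChars i) =
        List.drop ((PySem.Int.toChars i).length / 2) (PySem.Int.toChars i)) := by
  have hmod : PySem.Int.mod (PySem.List.len (PySem.Int.toChars i)) 2 =
      (((PySem.Int.toChars i).length % 2 : ℕ) : ℤ) := by
    simp [PySem.Int.mod, Int.fmod_eq_emod, PySem.List.len]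
  have hdiv : PySem.Int.floordiv (PySem.List.len (PySem.Int.toChars i)) 2 =
      (((PySem.Int.toChars i).length / 2 : ℕ) : ℤ) := by
    simp [PySem.Int.floordiv, Int.fdiv_eq_ediv, PySem.List.len]
  simp only [pvPredB, hmod, hdiv, PySem.List.slice_zero_start, PySem.List.slice_to_natCast,
    PySem.List.slice_from_natCast]
  split_ifs with hc
  · simp only [decide_eq_true_eq]
    constructor
    · intro he; exact ⟨by exact_mod_cast hc, he⟩
    · intro ⟨_, he⟩; exact he
  · simp only [false_iff, not_and]
    intro hm
    exact absurd (by exact_mod_cast hm : (((PySem.Int.toChars i).length % 2 : ℕ) : ℤ) = 0) hc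

theorem pvDC_ne_dash : ∀ d : ℕ, d < 10 → Nat.digitChar d ≠ '-' := by decide

theorem pvDC_inj : ∀ d₁ : ℕ, d₁ < 10 → ∀ d₂ : ℕ, d₂ < 10 → Nat.digitChar d₁ = Nat.digitChar d₂ → d₁ = d₂ := by decide

theorem pvMap_dc_inj : ∀ (l₁ l₂ : List ℕ), (∀ x ∈ l₁, x < 10) → (∀ x ∈ l₂, x < 10) →
    l₁.map Nat.digitChar = l₂.map Nat.digitChar → l₁ = l₂ := by
  intro l₁
  induction l₁ with
  | nil => intro l₂ _ _ h; cases l₂ <;> simp_all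
  | cons a t ih =>
    intro l₂ h1 h2 h
    cases l₂ with
    | nil => simp_all
    | cons b u =>
      simp only [List.map_cons, List.cons.injEq] at h
      have hab := pvDC_inj a (h1 a List.mem_cons_self) b (h2 b List.mem_cons_self) h.1
      rw [hab, ih u (fun x hx => h1 x (List.mem_cons_of_mem a hx))
        (fun x hx => h2 x (List.mem_cons_of_mem b hx)) h.2]

theorem pvPredB_iff (i : Int) : pvPredB i = true ↔ pvRep i := by
  rcases lt_trichotomy i 0 with hi | hi | hi
  · rw [pvPredB_eq]
    constructor
    · rintro ⟨hev, heq⟩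
      exfalso
      rw [pvToChars_neg i hi] at hev heq
      set ds := ((Nat.digits 10 i.natAbs).map Nat.digitChar).reverse with hds
      rw [List.length_cons] at hev heq
      set q := (ds.length + 1) / 2 with hq
      have hq1 : 1 ≤ q := by omega
      have htk : List.take q ('-' :: ds) = '-' :: List.take (q - 1) ds := by
        rw [show q = (q - 1) + 1 by omega, List.take_succ_cons]
        simp
      have hdr : List.drop q ('-' :: ds) = List.drop (q - 1) ds := by
        rw [show q = (q - 1) + 1 by omega, List.drop_succ_cons]
        simp
      rw [htk, hdr] at heq
      have hmem : '-' ∈ ds := List.mem_of_mem_drop (heq ▸ List.mem_cons_self)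
      rw [hds, List.mem_reverse, List.mem_map] at hmem
      obtain ⟨d, hd, hdc⟩ := hmem
      exact pvDC_ne_dash d (Nat.digits_lt_base (by norm_num) hd) hdc
    · intro hr
      exact absurd (pvRep_ge i hr) (by omega)
  · subst hi
    constructor
    · intro h; exact absurd h (by decide)
    · intro hr; exact absurd (pvRep_ge 0 hr) (by omega)
  · have hi' : i = ((i.toNat : ℕ) : ℤ) := (Int.toNat_of_nonneg hi.le).symm
    set n := i.toNat with hn
    have hn0 : 0 < n := by omega
    rw [pvPredB_eq, hi', pvToChars_pos n hn0]
    set ds := Nat.digits 10 n with hds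
    have hlen : (((ds.map Nat.digitChar).reverse : List Char)).length = ds.length := by simp
    rw [hlen]
    set D := ds.length with hD
    have hdsne : ds ≠ [] := Nat.digits_ne_nil_iff_ne_zero.mpr (by omega)
    have hD1 : 1 ≤ D := List.length_pos_iff.mpr hdsne
    have hmemds : ∀ x ∈ ds, x < 10 := fun x hx => Nat.digits_lt_base (by norm_num) hx
    constructor
    · rintro ⟨hev, heq⟩
      set k := D / 2 with hk
      have hDk : D = 2 * k := by omega
      have hk1 : 1 ≤ k := by omega
      rw [List.take_reverse, List.drop_reverse, List.length_map, ← hD,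
        show D - k = k by omega, List.reverse_inj, ← List.map_take, ← List.map_drop] at heq
      have hdt : ds.drop k = ds.take k :=
        pvMap_dc_inj _ _ (fun x hx => hmemds x (List.mem_of_mem_drop hx))
          (fun x hx => hmemds x (List.mem_of_mem_take hx)) heq
      have htlen : (ds.take k).length = k := by
        rw [List.length_take]; omega
      have hsplit : ds = ds.take k ++ ds.take k := by
        conv_lhs => rw [← List.take_append_drop k ds]
        rw [hdt]
      set t := ds.take k with ht
      have htne : t ≠ [] := List.length_pos_iff.mp (by omega)
      have hlast : ∀ (hne : t ≠ []), t.getLast hne ≠ 0 := by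
        intro hne hc
        have e0 : ds.getLast? = some 0 := by
          rw [hsplit, List.getLast?_append_of_ne_nil t hne, List.getLast?_eq_some_getLast hne, hc]
        have e1 : ds.getLast hdsne = 0 :=
          Option.some.inj (by rw [← List.getLast?_eq_some_getLast hdsne, e0])
        exact Nat.getLast_digit_ne_zero 10 (show n ≠ 0 by omega) e1
      set h := Nat.ofDigits 10 t with hh
      have hofn : n = h + 10 ^ k * h := by
        conv_lhs => rw [← Nat.ofDigits_digits 10 n, ← hds, hsplit]
        rw [Nat.ofDigits_append, htlen]
      have hdig : Nat.digits 10 h = t :=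
        Nat.digits_ofDigits 10 (by norm_num) t
          (fun x hx => hmemds x (List.mem_of_mem_take hx)) hlast
      have hhi : h < 10 ^ k := (Nat.digits_length_le_iff (b := 10) (by norm_num) h).mp
        (by rw [hdig, htlen])
      have hlo : 10 ^ (k - 1) ≤ h := (Nat.lt_digits_length_iff (b := 10) (by norm_num) h).mp
        (by rw [hdig, htlen]; omega)
      refine ⟨k, h, hk1, hlo, hhi, ?_⟩
      rw [hofn]
      push_cast
      ring
    · rintro ⟨k, h, hk1, hlo, hhi, hx⟩
      have hxn : n = h * (10 ^ k + 1) := by exact_mod_cast hx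
      set t := Nat.digits 10 h with ht
      have hh0 : h ≠ 0 := by
        have : (1 : ℕ) ≤ 10 ^ (k - 1) := Nat.one_le_pow _ _ (by norm_num)
        omega
      have htlen : t.length = k := by
        have h1 := (Nat.digits_length_le_iff (b := 10) (by norm_num) h).mpr hhi
        have h2 := (Nat.lt_digits_length_iff (b := 10) (by norm_num) h).mpr hlo
        rw [← ht] at h1 h2
        omega
      have htne : t ≠ [] := Nat.digits_ne_nil_iff_ne_zero.mpr hh0
      have hdig : Nat.digits 10 n = t ++ t := by
        have hof : Nat.ofDigits 10 (t ++ t) = n := by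
          rw [Nat.ofDigits_append, ht, Nat.ofDigits_digits, htlen, hxn]
          ring
        rw [← hof]
        apply Nat.digits_ofDigits 10 (by norm_num)
        · intro x hx
          rcases List.mem_append.mp hx with h' | h' <;>
            exact Nat.digits_lt_base (by norm_num) h'
        · intro hne
          rw [List.getLast_append, dif_neg (by simpa using htne)]
          exact Nat.getLast_digit_ne_zero 10 hh0
      have hDval : D = 2 * k := by
        rw [hD, hds, hdig]; simp [htlen]; omega
      refine ⟨by omega, ?_⟩
      rw [List.take_reverse, List.drop_reverse, List.length_map, ← hD,
        show D - D / 2 = D / 2 by omega, List.reverse_inj, ← List.map_take, ← List.map_drop]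
      have hds2 : ds = t ++ t := hdig
      rw [hds2, show D / 2 = k by omega, List.take_left' htlen, List.drop_left' htlen]

theorem pv_memA (start stop x : Int) :
    x ∈ get_invalid_ids start stop ↔ start ≤ x ∧ x ≤ stop ∧ pvRep x := by
  rw [pvA_eq_filter, List.mem_filter, PySem.List.mem_pyRange_one, pvPredB_iff]
  constructor
  · rintro ⟨⟨h1, h2⟩, h3⟩; exact ⟨h1, by omega, h3⟩
  · rintro ⟨h1, h2, h3⟩; exact ⟨⟨h1, by omega⟩, h3⟩

theorem pv_memB (start stop x : Int) (h : 11 ≤ stop) :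
    x ∈ get_invalid_ids_alt start stop ↔ start ≤ x ∧ x ≤ stop ∧ pvRep x := by
  have hstop' : stop = ((stop.toNat : ℕ) : ℤ) := (Int.toNat_of_nonneg (by omega)).symm
  have hchars : (PySem.Int.toChars stop).length = (Nat.digits 10 stop.toNat).length := by
    conv_lhs => rw [hstop']
    rw [pvToChars_pos stop.toNat (by omega)]
    simp
  set Ds := (Nat.digits 10 stop.toNat).length with hDs
  have hmaxk : PySem.Int.floordiv (PySem.List.len (PySem.Int.toChars stop) + 1) 2 =
      (((Ds + 1) / 2 : ℕ) : ℤ) := by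
    simp [PySem.List.len, hchars, PySem.Int.floordiv, Int.fdiv_eq_ediv]
  have hfd : ∀ (a : ℤ) (K : ℕ), PySem.Int.floordiv a (10 ^ K + 1) = a / (10 ^ K + 1) := by
    intro a K
    rw [PySem.Int.floordiv, Int.fdiv_eq_ediv, if_pos (Or.inl (by positivity)), sub_zero]
  rw [pvB_eq_flatMap start stop h, List.mem_flatMap]
  constructor
  · rintro ⟨k, hk, hxb⟩
    rw [PySem.List.mem_pyRange_one] at hk
    unfold pvBlock at hxb
    simp only [List.mem_map] at hxb
    obtain ⟨hh, hmem, hxeq⟩ := hxb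
    rw [PySem.List.mem_pyRange_one] at hmem
    set K := k.toNat with hK
    have hK1 : 1 ≤ K := by omega
    rw [hfd, hfd] at hmem
    have hmpos : (0 : ℤ) < 10 ^ K + 1 := by positivity
    have hlo2 : (10 : ℤ) ^ (K - 1) ≤ hh := le_trans (le_max_left _ _) hmem.1
    have hlo3 : -(-start / (10 ^ K + 1)) ≤ hh := le_trans (le_max_right _ _) hmem.1
    have hhiA : hh ≤ (10 : ℤ) ^ K - 1 := by
      have := hmem.2; omega
    have hhiB : hh ≤ stop / (10 ^ K + 1) := by
      have := hmem.2; omega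
    have hh0 : (0 : ℤ) ≤ hh := le_trans (by positivity) hlo2
    have hhcast : ((hh.toNat : ℕ) : ℤ) = hh := Int.toNat_of_nonneg hh0
    have hxle : x ≤ stop := by
      have := (Int.le_ediv_iff_mul_le hmpos).mp hhiB
      rw [← hxeq]; exact this
    have hxge : start ≤ x := by
      have h' : -hh ≤ -start / (10 ^ K + 1) := by omega
      have := (Int.le_ediv_iff_mul_le hmpos).mp h'
      rw [← hxeq]; linarith
    refine ⟨hxge, hxle, K, hh.toNat, hK1, ?_, ?_, ?_⟩
    · have : ((10 ^ (K - 1) : ℕ) : ℤ) ≤ ((hh.toNat : ℕ) : ℤ) := by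
        rw [hhcast]; push_cast; exact hlo2
      exact_mod_cast this
    · have : ((hh.toNat : ℕ) : ℤ) < ((10 ^ K : ℕ) : ℤ) := by
        rw [hhcast]; push_cast; omega
      exact_mod_cast this
    · rw [← hxeq]; rw [hhcast]
  · rintro ⟨hge, hle, k, hq, hk1, hlo, hhi, hx⟩
    have hmpos : (0 : ℤ) < 10 ^ k + 1 := by positivity
    refine ⟨(k : ℤ), ?_, ?_⟩
    · rw [PySem.List.mem_pyRange_one, hmaxk]
      refine ⟨by exact_mod_cast hk1, ?_⟩
      have hx10 : (10 : ℕ) ^ (2 * k - 1) ≤ stop.toNat := by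
        have h1 : (10 : ℕ) ^ (k - 1) * 10 ^ k ≤ hq * (10 ^ k + 1) := by
          calc (10 : ℕ) ^ (k - 1) * 10 ^ k ≤ hq * 10 ^ k := Nat.mul_le_mul_right _ hlo
          _ ≤ hq * (10 ^ k + 1) := Nat.mul_le_mul_left _ (by omega)
        have h2 : (10 : ℕ) ^ (2 * k - 1) = 10 ^ (k - 1) * 10 ^ k := by
          rw [← pow_add]; congr 1; omega
        have h3 : ((hq * (10 ^ k + 1) : ℕ) : ℤ) ≤ ((stop.toNat : ℕ) : ℤ) := by
          rw [← hstop']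
          push_cast
          rw [show ((hq : ℤ) * ((10 : ℤ) ^ k + 1)) = x from hx.symm]
          exact hle
        have h4 : hq * (10 ^ k + 1) ≤ stop.toNat := by exact_mod_cast h3
        omega
      have hdl := (Nat.lt_digits_length_iff (b := 10) (by norm_num) stop.toNat).mpr hx10
      omega
    · unfold pvBlock
      rw [List.mem_map]
      refine ⟨(hq : ℤ), ?_, ?_⟩
      · rw [PySem.List.mem_pyRange_one]
        simp only [Int.toNat_natCast]
        constructor
        · apply max_le
          · exact_mod_cast hlo
          · rw [hfd]
            have h' : -(hq : ℤ) * (10 ^ k + 1) ≤ -start := by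
              have : start ≤ (hq : ℤ) * (10 ^ k + 1) := hx ▸ hge
              linarith
            have h2 := (Int.le_ediv_iff_mul_le hmpos).mpr h'
            omega
        · rw [hfd]
          have hA : (hq : ℤ) ≤ 10 ^ k - 1 := by
            have : ((hq : ℕ) : ℤ) < ((10 ^ k : ℕ) : ℤ) := by exact_mod_cast hhi
            push_cast at this
            omega
          have hB : (hq : ℤ) ≤ stop / (10 ^ k + 1) :=
            (Int.le_ediv_iff_mul_le hmpos).mpr (by rw [show ((hq : ℤ) * ((10 : ℤ) ^ k + 1)) = x from hx.symm]; exact hle)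
          omega
      · simp only [Int.toNat_natCast]
        exact hx.symm

theorem pv_pairwiseA (start stop : Int) : (get_invalid_ids start stop).Pairwise (· < ·) := by
  rw [pvA_eq_filter]
  exact List.Pairwise.filter _ (PySem.List.pairwise_lt_pyRange_one _ _)

theorem pv_pairwise_flatMap {l : List Int} {f : Int → List Int}
    (h1 : ∀ a ∈ l, (f a).Pairwise (· < ·))
    (h2 : l.Pairwise (fun a b => ∀ x ∈ f a, ∀ y ∈ f b, x < y)) :
    (l.flatMap f).Pairwise (· < ·) := by
  induction l with
  | nil => simp
  | cons a t ih =>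
    rw [List.flatMap_cons, List.pairwise_append]
    obtain ⟨ha2, ht2⟩ := List.pairwise_cons.mp h2
    refine ⟨h1 a List.mem_cons_self, ih (fun b hb => h1 b (List.mem_cons_of_mem a hb)) ht2, ?_⟩
    intro x hx y hy
    rw [List.mem_flatMap] at hy
    obtain ⟨b, hb, hyb⟩ := hy
    exact ha2 b hb x hx y hyb

theorem pv_pairwiseB (start stop : Int) : (get_invalid_ids_alt start stop).Pairwise (· < ·) := by
  by_cases hs : 11 ≤ stop
  · rw [pvB_eq_flatMap start stop hs]
    apply pv_pairwise_flatMap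
    · intro a _
      unfold pvBlock
      refine List.Pairwise.map _ ?_ (PySem.List.pairwise_lt_pyRange_one _ _)
      intro x y hxy
      exact mul_lt_mul_of_pos_right hxy (by positivity)
    · refine List.Pairwise.imp_of_mem ?_ (PySem.List.pairwise_lt_pyRange_one _ _)
      intro a b ha hb hab x hx y hy
      rw [PySem.List.mem_pyRange_one] at ha hb
      unfold pvBlock at hx hy
      simp only [List.mem_map] at hx hy
      obtain ⟨u, hu, hux⟩ := hx
      obtain ⟨v, hv, hvy⟩ := hy
      rw [PySem.List.mem_pyRange_one] at hu hv
      set A := a.toNat with hA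
      set B := b.toNat with hB
      have hu2 : u ≤ 10 ^ A - 1 := by have := hu.2; omega
      have hv1 : (10 : ℤ) ^ (B - 1) ≤ v := le_trans (le_max_left _ _) hv.1
      have hx_le : u * (10 ^ A + 1) ≤ ((10 : ℤ) ^ A - 1) * (10 ^ A + 1) :=
        mul_le_mul_of_nonneg_right hu2 (by positivity)
      have hy_ge : (10 : ℤ) ^ (B - 1) * (10 ^ B + 1) ≤ v * (10 ^ B + 1) :=
        mul_le_mul_of_nonneg_right hv1 (by positivity)
      have hmid : (10 : ℤ) ^ A * 10 ^ A ≤ 10 ^ (B - 1) * 10 ^ B :=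
        mul_le_mul (pow_le_pow_right₀ (by norm_num) (by omega))
          (pow_le_pow_right₀ (by norm_num) (by omega)) (by positivity) (by positivity)
      have e1 : ((10 : ℤ) ^ A - 1) * (10 ^ A + 1) = 10 ^ A * 10 ^ A - 1 := by ring
      have e2 : (10 : ℤ) ^ (B - 1) * (10 ^ B + 1) = 10 ^ (B - 1) * 10 ^ B + 10 ^ (B - 1) := by ring
      have e3 : (0 : ℤ) ≤ 10 ^ (B - 1) := by positivity
      rw [← hux, ← hvy]
      linarith
  · unfold get_invalid_ids_alt
    rw [if_neg hs]
    exact List.Pairwise.nil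

theorem pv_sorted_ext (l₁ l₂ : List Int) (h₁ : l₁.Pairwise (· < ·)) (h₂ : l₂.Pairwise (· < ·))
    (h : ∀ x, x ∈ l₁ ↔ x ∈ l₂) : l₁ = l₂ := by
  induction l₁ generalizing l₂ with
  | nil =>
    cases l₂ with
    | nil => rfl
    | cons b u => exact absurd ((h b).mpr (List.mem_cons_self)) (List.not_mem_nil)
  | cons a t ih =>
    cases l₂ with
    | nil => exact absurd ((h a).mp (List.mem_cons_self)) (List.not_mem_nil)
    | cons b u =>
      obtain ⟨hat, ht⟩ := List.pairwise_cons.mp h₁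
      obtain ⟨hbu, hu⟩ := List.pairwise_cons.mp h₂
      have hab : a = b := by
        rcases List.mem_cons.mp ((h a).mp List.mem_cons_self) with h' | h'
        · exact h'
        · rcases List.mem_cons.mp ((h b).mpr List.mem_cons_self) with h'' | h''
          · exact h''.symm
          · exact absurd (hat b h'') (not_lt.mpr (le_of_lt (hbu a h')))
      subst hab
      have : t = u := by
        refine ih u ht hu (fun x => ⟨fun hx => ?_, fun hx => ?_⟩)
        · rcases List.mem_cons.mp ((h x).mp (List.mem_cons_of_mem a hx)) with h' | h'
          · exact absurd (hat x hx) (by simp [h'])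
          · exact h'
        · rcases List.mem_cons.mp ((h x).mpr (List.mem_cons_of_mem a hx)) with h' | h'
          · exact absurd (hbu x hx) (by simp [h'])
          · exact h'
      rw [this]

-- ===== VERDICT (by name: the statement is the Claim_ definition above) =====
theorem get_invalid_ids_spec : Claim_equal_get_invalid_ids := by
  intro start stop _
  unfold Spec_get_invalid_ids
  by_cases hs : 11 ≤ stop
  · exact (pv_sorted_ext _ _ (pv_pairwiseA start stop) (pv_pairwiseB start stop)
      (fun x => (pv_memA start stop x).trans (pv_memB start stop x hs).symm))
  · rw [pvA_eq_filter, get_invalid_ids_alt, if_neg hs]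
    rw [List.filter_eq_nil_iff]
    intro x hx hpx
    have h1 := pvRep_ge x ((pvPredB_iff x).mp hpx)
    have h2 := (PySem.List.mem_pyRange_one.mp hx).2
    omega
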